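-- pv_equiv track=rewrite | github.com/AndNovv/biometry_labs | lab3.2/main.py | delNoisePoint
-- ===== SOURCE A (Python) =====
-- def __removeDouble(x,y):
--     z = []
--     for i in x:
--         c = True
--         for j in y:
--             if i == j:
--                 c = False
--         if c:
--             z.append(i)
--     for i in y:
--         c = True
--         for j in x:
--             if i == j:
--                 c = False
--         if c:
--             z.append(i)
--     return z
--
-- def delNoisePoint(branch_points, end_points):
--     tmp = []
--     tmp2 = []
--     for i in end_points:
--         # x = range(i[0]-100, i[0]+101)
--         # y = range(i[1]-100, i[1]+101)
--         x = range(i[0]-20, i[0]+21)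
--         y = range(i[1]-20, i[1]+21)
--
--         for j in branch_points:
--             if j[0] in x and j[1] in y:
--                 tmp.append(i)
--                 tmp2.append(j)
--     return (__removeDouble(branch_points, tmp2), __removeDouble(end_points, tmp))
-- ===== SOURCE B (Python) =====
-- def delNoisePoint(branch_points, end_points):
--     # Spatial hash grid (cell size 21): each point's matched test checks only
--     # the 3x3 neighbouring cells instead of scanning the whole other list.
--     def build(points):
--         g = {}
--         for p in points:
--             g.setdefault((p[0] // 21, p[1] // 21), []).append(p)
--         return g
--
--     def matched(p, grid):
--         cx, cy = p[0] // 21, p[1] // 21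
--         for dx in (-1, 0, 1):
--             for dy in (-1, 0, 1):
--                 for q in grid.get((cx + dx, cy + dy), ()):
--                     if abs(p[0] - q[0]) <= 20 and abs(p[1] - q[1]) <= 20:
--                         return True
--         return False
--
--     bgrid = build(branch_points)
--     egrid = build(end_points)
--     return ([b for b in branch_points if not matched(b, egrid)],
--             [e for e in end_points if not matched(e, bgrid)])
-- ===== Notes on version B (the rewrite author's own statement) =====
-- stated objective: faster
-- what changed: B buckets each point list into a spatial hash grid of 21x21 cells and tests each point's matched status by scanning only the 3x3 neighbouring buckets with early exit, then filters directly, replacing A's all-pairs end-pointxbranch-point scan plus the quadratic __removeDouble membership passes over the accumulated match lists.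
import Mathlib
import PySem

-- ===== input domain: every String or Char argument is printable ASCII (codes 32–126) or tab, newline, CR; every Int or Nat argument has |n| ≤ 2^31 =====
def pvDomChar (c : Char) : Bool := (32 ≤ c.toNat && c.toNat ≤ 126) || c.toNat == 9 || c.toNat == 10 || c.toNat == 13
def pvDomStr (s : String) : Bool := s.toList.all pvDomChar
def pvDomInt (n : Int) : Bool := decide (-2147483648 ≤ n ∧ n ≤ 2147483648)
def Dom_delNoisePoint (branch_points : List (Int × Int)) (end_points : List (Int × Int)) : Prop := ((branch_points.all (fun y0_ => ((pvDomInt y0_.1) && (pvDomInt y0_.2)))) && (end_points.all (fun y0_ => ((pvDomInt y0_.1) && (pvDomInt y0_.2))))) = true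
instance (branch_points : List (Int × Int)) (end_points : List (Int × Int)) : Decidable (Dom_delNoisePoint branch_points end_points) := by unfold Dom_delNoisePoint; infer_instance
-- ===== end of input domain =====

-- B replaces A's all-pairs scan + quadratic __removeDouble passes by a spatial hash
-- grid (cell size 21, 3x3 neighbourhood lookups) and direct filters (objective: faster).

-- ===== PORT A =====
-- __removeDouble
def pvRemoveDouble (x y : List (Int × Int)) : List (Int × Int) :=
  let z := x.foldl (fun z i =>
    let c := y.foldl (fun c j => if i = j then false else c) true
    if c then z ++ [i] else z) ([] : List (Int × Int))
  y.foldl (fun z i =>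
    let c := x.foldl (fun c j => if i = j then false else c) true
    if c then z ++ [i] else z) z

-- 'j[0] in range(i[0]-20, i[0]+21)' is the bound test i0-20 <= j0 < i0+21 (step 1, nonempty)
def pvInBox (i j : Int × Int) : Bool :=
  decide (i.1 - 20 ≤ j.1) && decide (j.1 < i.1 + 21) && decide (i.2 - 20 ≤ j.2) && decide (j.2 < i.2 + 21)

def delNoisePoint (branch_points : List (Int × Int)) (end_points : List (Int × Int)) : (List (Int × Int)) × (List (Int × Int)) :=
  let st := end_points.foldl (fun (acc : List (Int × Int) × List (Int × Int)) i =>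
    branch_points.foldl (fun acc j =>
      if pvInBox i j then (acc.1 ++ [i], acc.2 ++ [j]) else acc) acc) ([], [])
  (pvRemoveDouble branch_points st.2, pvRemoveDouble end_points st.1)

-- ===== PORT B =====
def pvCell (p : Int × Int) : Int × Int := (PySem.Int.floordiv p.1 21, PySem.Int.floordiv p.2 21)

def pvBuild (points : List (Int × Int)) : PySem.Dict (Int × Int) (List (Int × Int)) :=
  points.foldl (fun g p => g.modify (pvCell p) [] (· ++ [p])) PySem.Dict.empty

def pvMatched (p : Int × Int) (grid : PySem.Dict (Int × Int) (List (Int × Int))) : Bool :=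
  let c := pvCell p
  ([-1, 0, 1] : List Int).any fun dx => ([-1, 0, 1] : List Int).any fun dy =>
    (grid.getD (c.1 + dx, c.2 + dy) []).any fun q =>
      decide (|p.1 - q.1| ≤ 20) && decide (|p.2 - q.2| ≤ 20)

def delNoisePoint_alt (branch_points : List (Int × Int)) (end_points : List (Int × Int)) : (List (Int × Int)) × (List (Int × Int)) :=
  let bgrid := pvBuild branch_points
  let egrid := pvBuild end_points
  (branch_points.filter (fun b => !pvMatched b egrid),
   end_points.filter (fun e => !pvMatched e bgrid))

-- ===== PRECONDITION & SPEC =====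
def Spec_delNoisePoint (branch_points : List (Int × Int)) (end_points : List (Int × Int)) (out : (List (Int × Int)) × (List (Int × Int))) : Prop := out = delNoisePoint_alt branch_points end_points
instance (branch_points : List (Int × Int)) (end_points : List (Int × Int)) (out : (List (Int × Int)) × (List (Int × Int))) : Decidable (Spec_delNoisePoint branch_points end_points out) := by unfold Spec_delNoisePoint; infer_instance

-- ===== CLAIM (what is proved, stated in full; the proofs are below) =====
def Claim_equal_delNoisePoint : Prop := ∀ (branch_points : List (Int × Int)) (end_points : List (Int × Int)), Dom_delNoisePoint branch_points end_points → Spec_delNoisePoint branch_points end_points (delNoisePoint branch_points end_points)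

-- ===== LEMMAS AND PROOFS =====

-- A's inner membership loop computes b && not (i ∈ y)
theorem pv_inner_foldl (y : List (Int × Int)) (i : Int × Int) (b : Bool) :
    y.foldl (fun c j => if i = j then false else c) b = (b && !decide (i ∈ y)) := by
  induction y generalizing b with
  | nil => simp
  | cons j ys ih =>
    simp only [List.foldl_cons, ih, List.mem_cons]
    by_cases h : i = j <;> simp [h]

theorem pv_removeDouble_eq (x y : List (Int × Int)) :
    pvRemoveDouble x y = x.filter (fun i => !decide (i ∈ y)) ++ y.filter (fun i => !decide (i ∈ x)) := by
  unfold pvRemoveDouble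
  simp only [pv_inner_foldl, Bool.true_and]
  rw [PySem.List.foldl_append_if_eq_filter, PySem.List.foldl_append_if_eq_filter]
  simp

-- A's pair-accumulating double loop
theorem pv_inner_pairs (bp : List (Int × Int)) (i : Int × Int) (acc : List (Int × Int) × List (Int × Int)) :
    bp.foldl (fun acc j => if pvInBox i j then (acc.1 ++ [i], acc.2 ++ [j]) else acc) acc
      = (acc.1 ++ (bp.filter (pvInBox i)).map (fun _ => i), acc.2 ++ bp.filter (pvInBox i)) := by
  induction bp generalizing acc with
  | nil => simp
  | cons j bs ih =>
    simp only [List.foldl_cons]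
    by_cases h : pvInBox i j <;> simp [h, ih]

theorem pv_outer_pairs (bp ep : List (Int × Int)) (acc : List (Int × Int) × List (Int × Int)) :
    ep.foldl (fun acc i => bp.foldl (fun acc j => if pvInBox i j then (acc.1 ++ [i], acc.2 ++ [j]) else acc) acc) acc
      = (acc.1 ++ ep.flatMap (fun i => (bp.filter (pvInBox i)).map (fun _ => i)),
         acc.2 ++ ep.flatMap (fun i => bp.filter (pvInBox i))) := by
  induction ep generalizing acc with
  | nil => simp
  | cons i es ih =>
    rw [List.foldl_cons, pv_inner_pairs, ih]
    simp [List.append_assoc]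

-- grid bucket contents
theorem pv_build_getD (pts : List (Int × Int)) (c : Int × Int) :
    (pvBuild pts).getD c [] = pts.filter (fun p => pvCell p == c) := by
  unfold pvBuild
  have h : pts.foldl (fun g p => g.modify (pvCell p) [] (· ++ [p])) PySem.Dict.empty
      = (pts.map (fun p => (pvCell p, p))).foldl (fun d q => d.modify q.1 [] (· ++ [q.2])) PySem.Dict.empty := by
    rw [List.foldl_map]
  rw [h, PySem.Dict.getD_foldl_modify_append]
  simp [List.filter_map, Function.comp_def]

theorem pv_cell_near (a b : Int) (h : |a - b| ≤ 20) :
    PySem.Int.floordiv b 21 - PySem.Int.floordiv a 21 = -1 ∨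
    PySem.Int.floordiv b 21 - PySem.Int.floordiv a 21 = 0 ∨
    PySem.Int.floordiv b 21 - PySem.Int.floordiv a 21 = 1 := by
  rw [abs_le] at h
  rw [PySem.Int.floordiv_eq_ediv_of_pos (by norm_num), PySem.Int.floordiv_eq_ediv_of_pos (by norm_num)]
  omega

theorem pv_matched_eq (p : Int × Int) (pts : List (Int × Int)) :
    pvMatched p (pvBuild pts) = pts.any (fun q => decide (|p.1 - q.1| ≤ 20) && decide (|p.2 - q.2| ≤ 20)) := by
  rw [Bool.eq_iff_iff]
  simp only [pvMatched, List.any_eq_true, pv_build_getD, List.mem_filter, Bool.and_eq_true,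
    decide_eq_true_eq, beq_iff_eq]
  constructor
  · rintro ⟨dx, _, dy, _, q, ⟨hq, _⟩, h1, h2⟩
    exact ⟨q, hq, h1, h2⟩
  · rintro ⟨q, hq, h1, h2⟩
    refine ⟨PySem.Int.floordiv q.1 21 - PySem.Int.floordiv p.1 21, ?_,
            PySem.Int.floordiv q.2 21 - PySem.Int.floordiv p.2 21, ?_,
            q, ⟨hq, ?_⟩, h1, h2⟩
    · rcases pv_cell_near p.1 q.1 h1 with h | h | h <;> rw [h] <;> decide
    · rcases pv_cell_near p.2 q.2 h2 with h | h | h <;> rw [h] <;> decide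
    · simp only [pvCell, Prod.mk.injEq]
      omega

-- the box test is the symmetric Chebyshev-distance test
theorem pv_inBox_iff (i j : Int × Int) :
    pvInBox i j = true ↔ (|j.1 - i.1| ≤ 20 ∧ |j.2 - i.2| ≤ 20) := by
  simp only [pvInBox, Bool.and_eq_true, decide_eq_true_eq, abs_le]
  omega

theorem delNoisePoint_eq_filters (bp ep : List (Int × Int)) :
    delNoisePoint bp ep
      = (bp.filter (fun j => !ep.any (fun i => decide (|j.1 - i.1| ≤ 20) && decide (|j.2 - i.2| ≤ 20))),
         ep.filter (fun i => !bp.any (fun j => decide (|i.1 - j.1| ≤ 20) && decide (|i.2 - j.2| ≤ 20)))) := by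
  unfold delNoisePoint
  rw [pv_outer_pairs]
  simp only [List.nil_append, pv_removeDouble_eq]
  have hz2 : (ep.flatMap (fun i => bp.filter (pvInBox i))).filter (fun i => !decide (i ∈ bp)) = [] := by
    rw [List.filter_eq_nil_iff]
    intro a ha
    simp only [List.mem_flatMap, List.mem_filter] at ha
    obtain ⟨i, hi, hab, _⟩ := ha
    simp [hab]
  have hz1 : (ep.flatMap (fun i => (bp.filter (pvInBox i)).map (fun _ => i))).filter (fun i => !decide (i ∈ ep)) = [] := by
    rw [List.filter_eq_nil_iff]
    intro a ha
    simp only [List.mem_flatMap, List.mem_map] at ha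
    obtain ⟨i, hi, _, _, rfl⟩ := ha
    simp [hi]
  rw [hz2, hz1]
  simp only [List.append_nil, Prod.mk.injEq]
  constructor
  · apply List.filter_congr
    intro a _
    have h : decide (a ∈ ep.flatMap fun i => bp.filter (pvInBox i))
        = ep.any (fun i => decide (|a.1 - i.1| ≤ 20) && decide (|a.2 - i.2| ≤ 20)) := by
      rw [Bool.eq_iff_iff]
      simp only [decide_eq_true_eq, List.any_eq_true, List.mem_flatMap, List.mem_filter,
        Bool.and_eq_true]
      constructor
      · rintro ⟨i, hi, _, hin⟩
        exact ⟨i, hi, by simpa using ((pv_inBox_iff i a).1 hin).1,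
               by simpa using ((pv_inBox_iff i a).1 hin).2⟩
      · rintro ⟨i, hi, h1, h2⟩
        exact ⟨i, hi, ⟨by assumption, (pv_inBox_iff i a).2 ⟨by simpa using h1, by simpa using h2⟩⟩⟩
    rw [h]
  · apply List.filter_congr
    intro a ha
    have h : decide (a ∈ ep.flatMap fun i => (bp.filter (pvInBox i)).map (fun _ => i))
        = bp.any (fun j => decide (|a.1 - j.1| ≤ 20) && decide (|a.2 - j.2| ≤ 20)) := by
      rw [Bool.eq_iff_iff]
      simp only [decide_eq_true_eq, List.any_eq_true, List.mem_flatMap, List.mem_filter,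
        List.mem_map, Bool.and_eq_true]
      constructor
      · rintro ⟨i, hi, x, ⟨hx, hin⟩, heq⟩
        subst heq
        refine ⟨x, hx, ?_, ?_⟩
        · rw [abs_sub_comm]; simpa using ((pv_inBox_iff i x).1 hin).1
        · rw [abs_sub_comm]; simpa using ((pv_inBox_iff i x).1 hin).2
      · rintro ⟨j, hj, h1, h2⟩
        refine ⟨a, ha, j, ⟨hj, (pv_inBox_iff a j).2 ⟨?_, ?_⟩⟩, rfl⟩
        · rw [abs_sub_comm]; exact h1
        · rw [abs_sub_comm]; exact h2
    rw [h]

-- ===== VERDICT (by name: the statement is the Claim_ definition above) =====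
theorem delNoisePoint_spec : Claim_equal_delNoisePoint := by
  intro bp ep _
  show delNoisePoint bp ep = delNoisePoint_alt bp ep
  rw [delNoisePoint_eq_filters]
  unfold delNoisePoint_alt
  simp only [pv_matched_eq]
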